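-- pv_equiv track=rewrite | github.com/chrismaidlow/twitter-histogram | twitter-histogram.py | get_histogram_tag_count_for_users
-- ===== SOURCE A (Python) =====
-- def get_histogram_tag_count_for_users(data,usernames):
--     '''Create histograms of total times hashtag used'''
--
--     hist_dict = {}
--
--     for item in data:
--
--         user = item[0]
--
--         #check if user in usernames
--         if user in usernames:
--
--             hashes = item[2]
--
--             for tag in hashes:
--
--                 #if tag in dict iterate count
--                 if tag in hist_dict:
--
--                     hist_dict[tag] += 1
--
--                 #Add to dict if new
--                 else:
--
--                     hist_dict[tag] = 1
--
--     return hist_dict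
-- ===== SOURCE B (Python) =====
-- def get_histogram_tag_count_for_users(data, usernames):
--     '''Create histograms of total times hashtag used'''
--     tags = []
--     for item in data:
--         if item[0] in usernames:
--             tags.extend(item[2])
--     hist = {}
--     while tags:
--         t = tags[0]
--         remaining = [x for x in tags if x != t]
--         hist[t] = len(tags) - len(remaining)
--         tags = remaining
--     return hist
-- ===== Notes on version B (the rewrite author's own statement) =====
-- stated objective: alternative
-- what changed: Replaces the per-tag dict-increment counter with a partition-by-removal grouping: first flatten the matching users' hashtags into one list, then repeatedly take the head tag, derive its count as the length drop when all its occurrences are filtered out, and continue on the shrunken list; the dict is only written once per distinct tag, in first-occurrence order.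
import Mathlib
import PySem

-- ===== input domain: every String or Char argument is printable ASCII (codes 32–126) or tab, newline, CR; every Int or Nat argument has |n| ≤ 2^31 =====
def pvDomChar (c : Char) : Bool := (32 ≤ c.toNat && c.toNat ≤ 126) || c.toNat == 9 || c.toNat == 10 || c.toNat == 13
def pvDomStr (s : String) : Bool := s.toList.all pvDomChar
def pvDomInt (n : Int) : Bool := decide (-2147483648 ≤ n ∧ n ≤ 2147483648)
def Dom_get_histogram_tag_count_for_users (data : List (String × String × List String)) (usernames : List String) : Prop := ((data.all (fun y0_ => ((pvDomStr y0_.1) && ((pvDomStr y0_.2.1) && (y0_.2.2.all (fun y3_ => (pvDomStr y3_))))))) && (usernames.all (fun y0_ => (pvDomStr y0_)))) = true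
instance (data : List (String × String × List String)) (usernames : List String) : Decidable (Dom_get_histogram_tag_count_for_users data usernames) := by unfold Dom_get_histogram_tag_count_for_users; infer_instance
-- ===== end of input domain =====

-- B replaces A's per-tag dict-increment counter by a partition-by-removal grouping
-- (flatten matching users' tags, then repeatedly take the head tag, count it as the
-- length drop when filtering it out, and recurse on the shrunken list); an alternative
-- structure, not claimed faster. Return-value equivalence only.


-- ===== PORT A =====
-- 'hist_dict[tag] += 1' is guarded by 'tag in hist_dict', so reading with default 0 is exact there.
def get_histogram_tag_count_for_users (data : List (String × String × List String)) (usernames : List String) : List (String × Int) :=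
  (data.foldl (fun hist_dict item =>
      if item.1 ∈ usernames then
        item.2.2.foldl (fun d tag =>
          if d.contains tag then d.insert tag (d.getD tag 0 + 1)
          else d.insert tag 1) hist_dict
      else hist_dict)
    (PySem.Dict.empty : PySem.Dict String Int)).items

-- ===== PORT B =====
-- the 'tags.extend(item[2])' collecting loop
def pvCollectTags (data : List (String × String × List String)) (usernames : List String) : List String :=
  data.foldl (fun tags item => if item.1 ∈ usernames then tags ++ item.2.2 else tags) []

-- the 'while tags:' remove-and-count loop; terminates because the head tag is removed
def pvGroupRemove : List String → List (String × Int)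
  | [] => []
  | t :: tl =>
    (t, ((t :: tl).length : Int) - ((t :: tl).filter (fun x => x ≠ t)).length)
      :: pvGroupRemove ((t :: tl).filter (fun x => x ≠ t))
termination_by l => l.length
decreasing_by
  have h := List.length_filter_le (fun x => !decide (x = t)) tl
  simp
  omega

def get_histogram_tag_count_for_users_alt (data : List (String × String × List String)) (usernames : List String) : List (String × Int) :=
  pvGroupRemove (pvCollectTags data usernames)

-- ===== PRECONDITION & SPEC =====
def Spec_get_histogram_tag_count_for_users (data : List (String × String × List String)) (usernames : List String) (out : List (String × Int)) : Prop := out = get_histogram_tag_count_for_users_alt data usernames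
instance (data : List (String × String × List String)) (usernames : List String) (out : List (String × Int)) : Decidable (Spec_get_histogram_tag_count_for_users data usernames out) := by unfold Spec_get_histogram_tag_count_for_users; infer_instance

-- ===== CLAIM (what is proved, stated in full; the proofs are below) =====
def Claim_equal_get_histogram_tag_count_for_users : Prop := ∀ (data : List (String × String × List String)) (usernames : List String), Dom_get_histogram_tag_count_for_users data usernames → Spec_get_histogram_tag_count_for_users data usernames (get_histogram_tag_count_for_users data usernames)

-- ===== LEMMAS AND PROOFS =====

-- A's per-tag branch is the unconditional counting insert (absent key reads as 0).
lemma step_eq (d : PySem.Dict String Int) (tag : String) :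
    (if d.contains tag then d.insert tag (d.getD tag 0 + 1) else d.insert tag 1)
      = d.insert tag (d.getD tag 0 + 1) := by
  by_cases h : d.contains tag = true
  · simp [h]
  · simp only [Bool.not_eq_true] at h
    simp [h, PySem.Dict.getD_of_not_contains d 0 h]

-- B's collecting loop is the filtered flatten.
lemma collect_eq (data : List (String × String × List String)) (usernames : List String) :
    ∀ acc : List String,
      data.foldl (fun tags item => if item.1 ∈ usernames then tags ++ item.2.2 else tags) acc
        = acc ++ (data.filter (fun item => decide (item.1 ∈ usernames))).flatMap (fun item => item.2.2) := by
  induction data with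
  | nil => simp
  | cons hd tl ih =>
    intro acc
    by_cases h : hd.1 ∈ usernames <;> simp [h, ih, List.append_assoc]

lemma foldl_add_filter {α : Type} [DecidableEq α] (t : α) :
    ∀ (l : List α) (s : PySem.Set α), t ∈ s →
      l.foldl PySem.Set.add s = (l.filter (fun x => x ≠ t)).foldl PySem.Set.add s := by
  intro l
  induction l with
  | nil => intro s _; rfl
  | cons x xs ih =>
    intro s hs
    by_cases hx : x = t
    · subst hx
      have : PySem.Set.add s x = s := by
        simp [PySem.Set.add, PySem.Set.contains, hs]
      simp [this, ih s hs]
    · have ht : t ∈ PySem.Set.add s x := by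
        simp only [PySem.Set.add]
        split <;> simp [hs]
      simp [hx, List.foldl_cons, ih _ ht]

lemma foldl_add_cons {α : Type} [DecidableEq α] (a : α) :
    ∀ (l : List α) (s : PySem.Set α), a ∉ l →
      l.foldl PySem.Set.add (a :: s) = a :: l.foldl PySem.Set.add s := by
  intro l
  induction l with
  | nil => intro s _; rfl
  | cons x xs ih =>
    intro s hl
    have hxa : x ≠ a := fun h => hl (by simp [h])
    have hxs : a ∉ xs := fun h => hl (by simp [h])
    have : PySem.Set.add (a :: s) x = a :: PySem.Set.add s x := by
      by_cases hc : x ∈ s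
      · simp [PySem.Set.add, PySem.Set.contains, hc]
      · simp [PySem.Set.add, PySem.Set.contains, hc, hxa]
    simp [List.foldl_cons, this, ih _ hxs]

-- first-occurrence dedup decomposes as head plus dedup of the head-free tail
lemma ofList_cons_filter {α : Type} [DecidableEq α] (t : α) (tl : List α) :
    PySem.Set.ofList (t :: tl) = t :: PySem.Set.ofList (tl.filter (fun x => x ≠ t)) := by
  have h0 : PySem.Set.ofList (t :: tl) = tl.foldl PySem.Set.add (PySem.Set.add [] t) := by
    simp [PySem.Set.ofList_eq_foldl]
  have h1 : PySem.Set.add ([] : PySem.Set α) t = [t] := by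
    simp [PySem.Set.add, PySem.Set.contains]
  have h2 : t ∈ ([t] : PySem.Set α) := by simp
  have h3 : t ∉ tl.filter (fun x => x ≠ t) := by simp
  rw [h0, h1, foldl_add_filter t tl [t] h2]
  have := foldl_add_cons t (tl.filter (fun x => x ≠ t)) [] h3
  rw [this]
  simp [PySem.Set.ofList_eq_foldl]

lemma count_add_filter_length {α : Type} [DecidableEq α] (t : α) (l : List α) :
    l.count t + (l.filter (fun x => x ≠ t)).length = l.length := by
  induction l with
  | nil => simp
  | cons x xs ih =>
    simp only [List.filter_cons, List.count_cons, List.length_cons, ne_eq, decide_not] at *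
    by_cases h : x = t
    · simp [h]; omega
    · simp [h]; omega

-- the counter's items, read in first-occurrence order, are exactly B's remove-and-count groups
lemma group_eq : ∀ (l : List String),
    (PySem.Set.ofList l).map (fun k => (k, (l.count k : Int))) = pvGroupRemove l := by
  intro l
  generalize hn : l.length = n
  induction n using Nat.strong_induction_on generalizing l with
  | _ n ihn =>
  match l with
  | [] => simp [pvGroupRemove, PySem.Set.ofList]
  | t :: tl =>
    subst hn
    have hlen : (tl.filter (fun x => x ≠ t)).length < (t :: tl).length := by
      have h := List.length_filter_le (fun x => !decide (x = t)) tl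
      simp only [ne_eq, decide_not, List.length_cons]
      omega
    have ih := ihn _ hlen (tl.filter (fun x => x ≠ t)) rfl
    rw [pvGroupRemove, ofList_cons_filter, List.map_cons]
    have hfl : (t :: tl).filter (fun x => x ≠ t) = tl.filter (fun x => x ≠ t) := by
      simp
    rw [hfl]
    congr 1
    · have h := count_add_filter_length t (t :: tl)
      rw [hfl] at h
      simp only [Prod.mk.injEq, true_and]
      push_cast [← h]
      ring
    · rw [← ih]
      apply List.map_congr_left
      intro k hk
      have hk' : k ∈ tl.filter (fun x => x ≠ t) := by
        simpa [PySem.Set.mem_ofList] using hk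
      have hkt : k ≠ t := by
        have := List.of_mem_filter hk'
        simpa using this
      have htk : ¬ t = k := fun h => hkt h.symm
      have h1 : (t :: tl).count k = tl.count k := by
        simp [htk]
      have h2 : (tl.filter (fun x => x ≠ t)).count k = tl.count k := by
        rw [List.count_filter]
        simp [hkt]
      simp only [ne_eq, decide_not] at h2
      simp [h1, h2]

-- ===== VERDICT (by name: the statement is the Claim_ definition above) =====
theorem get_histogram_tag_count_for_users_spec : Claim_equal_get_histogram_tag_count_for_users := by
  intro data usernames _
  unfold Spec_get_histogram_tag_count_for_users
  unfold get_histogram_tag_count_for_users get_histogram_tag_count_for_users_alt pvCollectTags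
  simp only [step_eq]
  rw [PySem.List.foldl_ite_eq_foldl_filter, ← List.foldl_flatMap,
    PySem.Dict.foldl_insert_getD_add_one_eq_counter, PySem.Dict.items_counter,
    collect_eq data usernames [], List.nil_append, group_eq]
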